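-- pv_equiv track=rewrite | github.com/daniel-reich/ubiquitous-fiesta | GGAKNYFg2JEwxzcqk_8.py | anti_divisors
-- ===== SOURCE A (Python) =====
-- def anti_divisors(n):
--     new = []
--     for i in range(2,n-1):
--         if n % i != 0:
--             if i % 2 != 0:
--                 if ((n*2)-1) % i == 0 or ((n*2)+1) % i == 0:
--                     new.append(i)
--             if i % 2 == 0:
--                 if (n*2) % i == 0:
--                     new.append(i)
--     return new
-- ===== SOURCE B (Python) =====
-- def _divisors(m):
--     """All positive divisors of m (none when m is not positive), by trial division up to its square root."""
--     divs = set()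
--     d = 1
--     while d * d <= m:
--         if m % d == 0:
--             divs.add(d)
--             divs.add(m // d)
--         d += 1
--     return divs
--
--
-- def anti_divisors(n):
--     res = {d for d in _divisors(2 * n - 1) | _divisors(2 * n + 1)
--            if d % 2 == 1 and 2 <= d <= n - 2}
--     res |= {d for d in _divisors(2 * n)
--             if d % 2 == 0 and 2 <= d <= n - 2 and n % d != 0}
--     return sorted(res)
-- ===== Notes on version B (the rewrite author's own statement) =====
-- stated objective: faster
-- what changed: Instead of scanning every i in 2..n-2, B enumerates the divisors of 2n-1, 2n and 2n+1 by trial division up to their square roots, filters them by parity/range, and returns the sorted set.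
import Mathlib
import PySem

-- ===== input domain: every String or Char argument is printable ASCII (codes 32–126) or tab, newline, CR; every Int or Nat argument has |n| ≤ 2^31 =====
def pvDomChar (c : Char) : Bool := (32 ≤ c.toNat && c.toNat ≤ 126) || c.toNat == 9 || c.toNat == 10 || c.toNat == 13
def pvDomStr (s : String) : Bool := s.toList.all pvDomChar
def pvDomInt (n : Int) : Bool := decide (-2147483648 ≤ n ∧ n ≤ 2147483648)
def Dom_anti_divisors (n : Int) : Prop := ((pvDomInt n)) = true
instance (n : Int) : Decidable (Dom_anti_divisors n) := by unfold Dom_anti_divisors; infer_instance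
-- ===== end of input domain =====

-- B replaces A's linear scan of 2..n-2 by trial-division divisor enumeration of
-- 2n-1, 2n and 2n+1 up to their square roots, then filters and sorts (objective: faster).

-- ===== PORT A =====
def anti_divisors (n : Int) : List Int :=
  (PySem.List.pyRange 2 (n - 1) 1).foldl (fun new i =>
    if PySem.Int.mod n i ≠ 0 then
      let new :=
        if PySem.Int.mod i 2 ≠ 0 then
          (if PySem.Int.mod (n * 2 - 1) i = 0 ∨ PySem.Int.mod (n * 2 + 1) i = 0 then
            new ++ [i] else new)
        else new
      if PySem.Int.mod i 2 = 0 then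
        (if PySem.Int.mod (n * 2) i = 0 then new ++ [i] else new)
      else new
    else new) []

-- ===== PORT B =====
-- termination helper for the trial-division while loop: d*d ≤ m forces d ≤ m
theorem pvDivLoop_dec (m d : Int) (h : d * d ≤ m) : (m + 1 - (d + 1)).toNat < (m + 1 - d).toNat := by
  have hd : d ≤ m := by nlinarith [sq_nonneg d]
  omega

-- while d*d <= m: if m % d == 0: divs.add(d); divs.add(m // d); d += 1
def pvDivLoop (m d : Int) (divs : PySem.Set Int) : PySem.Set Int :=
  if h : d * d ≤ m then
    pvDivLoop m (d + 1)
      (if PySem.Int.mod m d = 0 then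
        PySem.Set.add (PySem.Set.add divs d) (PySem.Int.floordiv m d)
      else divs)
  else divs
termination_by (m + 1 - d).toNat
decreasing_by exact pvDivLoop_dec m d h

def pvDivisors (m : Int) : PySem.Set Int := pvDivLoop m 1 PySem.Set.empty

def anti_divisors_alt (n : Int) : List Int :=
  let res : PySem.Set Int := PySem.Set.ofList
    (((PySem.Set.union (pvDivisors (2 * n - 1)) (pvDivisors (2 * n + 1))) : List Int).filter
      (fun d => decide (PySem.Int.mod d 2 = 1 ∧ 2 ≤ d ∧ d ≤ n - 2)))
  let res : PySem.Set Int := PySem.Set.union res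
    (((pvDivisors (2 * n)) : List Int).filter
      (fun d => decide (PySem.Int.mod d 2 = 0 ∧ 2 ≤ d ∧ d ≤ n - 2 ∧ PySem.Int.mod n d ≠ 0)))
  PySem.List.sorted res (fun x => x) false

-- ===== PRECONDITION & SPEC =====
def Spec_anti_divisors (n : Int) (out : List Int) : Prop := out = anti_divisors_alt n
instance (n : Int) (out : List Int) : Decidable (Spec_anti_divisors n out) := by unfold Spec_anti_divisors; infer_instance

-- ===== CLAIM (what is proved, stated in full; the proofs are below) =====
def Claim_equal_anti_divisors : Prop := ∀ (n : Int), Dom_anti_divisors n → Spec_anti_divisors n (anti_divisors n)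

-- ===== LEMMAS AND PROOFS =====

-- A's appended condition as one boolean predicate
def pvA (n i : Int) : Bool :=
  decide (PySem.Int.mod n i ≠ 0 ∧
    ((PySem.Int.mod i 2 ≠ 0 ∧ (PySem.Int.mod (n * 2 - 1) i = 0 ∨ PySem.Int.mod (n * 2 + 1) i = 0)) ∨
     (PySem.Int.mod i 2 = 0 ∧ PySem.Int.mod (n * 2) i = 0)))

theorem anti_divisors_eq_filter (n : Int) :
    anti_divisors n = (PySem.List.pyRange 2 (n - 1) 1).filter (pvA n) := by
  unfold anti_divisors
  refine (PySem.List.foldl_congr_mem _ _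
      (fun new i => if pvA n i then new ++ [i] else new) _ ?_).trans ?_
  · intro acc i _
    simp only [pvA]
    by_cases h1 : PySem.Int.mod n i = 0 <;> by_cases h2 : PySem.Int.mod i 2 = 0 <;>
      simp only [h1, h2] <;> split_ifs <;> simp_all
  · rw [PySem.List.foldl_append_if_eq_filter]
    simp

theorem mem_pvDivLoop (m d : Int) (hd1 : 1 ≤ d) (s : PySem.Set Int) (x : Int) :
    x ∈ pvDivLoop m d s ↔
      x ∈ s ∨ ∃ e, d ≤ e ∧ e * e ≤ m ∧ e ∣ m ∧ (x = e ∨ x = PySem.Int.floordiv m e) := by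
  have hsplit : ∀ (P : Int → Prop), (∃ e, d ≤ e ∧ P e) ↔ P d ∨ (∃ e, d + 1 ≤ e ∧ P e) := by
    intro P
    constructor
    · rintro ⟨e, he, hp⟩
      rcases eq_or_lt_of_le he with rfl | hlt
      · exact Or.inl hp
      · exact Or.inr ⟨e, by omega, hp⟩
    · rintro (hp | ⟨e, he, hp⟩)
      · exact ⟨d, le_refl d, hp⟩
      · exact ⟨e, by omega, hp⟩
  by_cases h : d * d ≤ m
  · rw [pvDivLoop, dif_pos h, mem_pvDivLoop m (d + 1) (by omega) _ x,
      hsplit (fun e => e * e ≤ m ∧ e ∣ m ∧ (x = e ∨ x = PySem.Int.floordiv m e))]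
    by_cases hdvd : PySem.Int.mod m d = 0
    · have hdm : d ∣ m := (PySem.Int.mod_eq_zero_iff_dvd m d).mp hdvd
      simp only [if_pos hdvd, PySem.Set.mem_add]
      constructor
      · rintro (((hx | rfl) | rfl) | he)
        · exact Or.inl hx
        · exact Or.inr (Or.inl ⟨h, hdm, Or.inl rfl⟩)
        · exact Or.inr (Or.inl ⟨h, hdm, Or.inr rfl⟩)
        · exact Or.inr (Or.inr he)
      · rintro (hx | (⟨_, _, (rfl | rfl)⟩ | he))
        · exact Or.inl (Or.inl (Or.inl hx))
        · exact Or.inl (Or.inl (Or.inr rfl))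
        · exact Or.inl (Or.inr rfl)
        · exact Or.inr he
    · have hdm : ¬ d ∣ m := fun hc => hdvd ((PySem.Int.mod_eq_zero_iff_dvd m d).mpr hc)
      simp only [if_neg hdvd]
      constructor
      · rintro (hx | he)
        · exact Or.inl hx
        · exact Or.inr (Or.inr he)
      · rintro (hx | (⟨_, hc, _⟩ | he))
        · exact Or.inl hx
        · exact absurd hc hdm
        · exact Or.inr he
  · rw [pvDivLoop, dif_neg h]
    constructor
    · exact Or.inl
    · rintro (hx | ⟨e, he, hem, _⟩)
      · exact hx
      · exact absurd (le_trans (by nlinarith : d * d ≤ e * e) hem) h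
termination_by (m + 1 - d).toNat
decreasing_by exact pvDivLoop_dec m d h

theorem nodup_pvDivLoop (m d : Int) (s : PySem.Set Int) (hs : s.Nodup) :
    (pvDivLoop m d s).Nodup := by
  by_cases h : d * d ≤ m
  · rw [pvDivLoop, dif_pos h]
    refine nodup_pvDivLoop m (d + 1) _ ?_
    split_ifs
    · exact PySem.Set.nodup_add _ _ (PySem.Set.nodup_add _ _ hs)
    · exact hs
  · rw [pvDivLoop, dif_neg h]
    exact hs
termination_by (m + 1 - d).toNat
decreasing_by exact pvDivLoop_dec m d h

theorem mem_pvDivisors (m x : Int) : x ∈ pvDivisors m ↔ 1 ≤ x ∧ 1 ≤ m ∧ x ∣ m := by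
  unfold pvDivisors
  rw [mem_pvDivLoop m 1 (le_refl 1) PySem.Set.empty x]
  constructor
  · rintro (hx | ⟨e, he1, hee, hem, hx⟩)
    · simp [PySem.Set.empty] at hx
    · have hm1 : 1 ≤ m := le_trans (by nlinarith) hee
      rcases hx with rfl | rfl
      · exact ⟨he1, hm1, hem⟩
      · have hfd : PySem.Int.floordiv m e = m / e := PySem.Int.floordiv_eq_ediv_of_pos (by omega)
        have hme : e * (m / e) = m := Int.mul_ediv_cancel' hem
        rw [hfd]
        have hpos : 1 ≤ m / e := by
          by_contra hq
          have hq' : m / e ≤ 0 := by omega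
          have hneg : e * (m / e) ≤ 0 := mul_nonpos_of_nonneg_of_nonpos (by omega) hq'
          linarith
        exact ⟨hpos, hm1, ⟨e, by linarith [mul_comm e (m / e)]⟩⟩
  · rintro ⟨hx1, hm1, hxm⟩
    right
    have hk : x * (m / x) = m := Int.mul_ediv_cancel' hxm
    set k := m / x with hkdef
    have hk1 : 1 ≤ k := by
      by_contra hq
      have hq' : k ≤ 0 := by omega
      have hneg : x * k ≤ 0 := mul_nonpos_of_nonneg_of_nonpos (by omega) hq'
      linarith
    by_cases hsq : x * x ≤ m
    · exact ⟨x, hx1, hsq, hxm, Or.inl rfl⟩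
    · have hlt : x * k < x * x := by omega
      have hkx : k < x := lt_of_mul_lt_mul_left hlt (by omega)
      have hkk : k * k ≤ m := by
        have h2 : k * k ≤ x * k := mul_le_mul_of_nonneg_right hkx.le (by omega)
        linarith
      refine ⟨k, hk1, hkk, ⟨x, by linarith [mul_comm x k]⟩, Or.inr ?_⟩
      rw [PySem.Int.floordiv_eq_ediv_of_pos (by omega : (0:Int) < k), ← hk]
      exact (Int.mul_ediv_cancel x (by omega)).symm

-- membership characterisation of B's collected set, before sorting
theorem pv_mem_iff (n x : Int) :
    (x ∈ PySem.List.pyRange 2 (n - 1) 1 ∧ pvA n x = true) ↔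
      x ∈ PySem.Set.union
        (PySem.Set.ofList
          (((PySem.Set.union (pvDivisors (2 * n - 1)) (pvDivisors (2 * n + 1))) : List Int).filter
            (fun d => decide (PySem.Int.mod d 2 = 1 ∧ 2 ≤ d ∧ d ≤ n - 2))))
        (((pvDivisors (2 * n)) : List Int).filter
          (fun d => decide (PySem.Int.mod d 2 = 0 ∧ 2 ≤ d ∧ d ≤ n - 2 ∧ PySem.Int.mod n d ≠ 0))) := by
  rw [PySem.Set.mem_union, PySem.Set.mem_ofList]
  simp only [List.mem_filter, PySem.Set.mem_union, PySem.List.mem_pyRange_one, pvA,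
    mem_pvDivisors, decide_eq_true_eq]
  have e1 : n * 2 - 1 = 2 * n - 1 := by ring
  have e2 : n * 2 + 1 = 2 * n + 1 := by ring
  have e3 : n * 2 = 2 * n := by ring
  rw [e1, e2, e3]
  constructor
  · rintro ⟨⟨hx2, hxlt⟩, hnmod, hcase⟩
    have hdvn : ¬ x ∣ n := fun hc =>
      hnmod ((PySem.Int.mod_eq_zero_iff_dvd n x).mpr hc)
    rcases hcase with ⟨hxo, hd⟩ | ⟨hxe, hd⟩
    · left
      have hxo1 : PySem.Int.mod x 2 = 1 := by
        rcases PySem.Int.mod_two_eq x with h | h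
        · exact absurd h hxo
        · exact h
      refine ⟨?_, hxo1, hx2, by omega⟩
      rcases hd with hd | hd
      · exact Or.inl ⟨by omega, by omega, (PySem.Int.mod_eq_zero_iff_dvd _ x).mp hd⟩
      · exact Or.inr ⟨by omega, by omega, (PySem.Int.mod_eq_zero_iff_dvd _ x).mp hd⟩
    · right
      exact ⟨⟨by omega, by omega, (PySem.Int.mod_eq_zero_iff_dvd _ x).mp hd⟩,
        hxe, hx2, by omega, hnmod⟩
  · have hone : ∀ x : Int, 2 ≤ x → x ∣ (1:Int) → False := fun x hx2 hd =>
      absurd (Int.le_of_dvd one_pos hd) (by omega)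
    rintro (⟨hdisj, hxo, hx2, hxle⟩ | ⟨⟨_, _, hdvd⟩, hxe, hx2, hxle, hnmod⟩)
    · have hdvn : ¬ x ∣ n := by
        intro hc
        have h2n : x ∣ 2 * n := Dvd.dvd.mul_left hc 2
        rcases hdisj with ⟨_, _, hd⟩ | ⟨_, _, hd⟩
        · exact hone x hx2 (by have := dvd_sub h2n hd; simpa using this)
        · exact hone x hx2 (by have := dvd_sub hd h2n; simpa using this)
      refine ⟨⟨hx2, by omega⟩, fun hc => hdvn ((PySem.Int.mod_eq_zero_iff_dvd n x).mp hc), Or.inl ⟨by omega, ?_⟩⟩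
      rcases hdisj with ⟨_, _, hd⟩ | ⟨_, _, hd⟩
      · exact Or.inl ((PySem.Int.mod_eq_zero_iff_dvd _ x).mpr hd)
      · exact Or.inr ((PySem.Int.mod_eq_zero_iff_dvd _ x).mpr hd)
    · exact ⟨⟨hx2, by omega⟩, hnmod, Or.inr ⟨hxe, (PySem.Int.mod_eq_zero_iff_dvd _ x).mpr hdvd⟩⟩

-- ===== VERDICT (by name: the statement is the Claim_ definition above) =====
theorem anti_divisors_spec : Claim_equal_anti_divisors := by
  unfold Claim_equal_anti_divisors
  intro n _
  unfold Spec_anti_divisors anti_divisors_alt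
  rw [anti_divisors_eq_filter]
  refine (PySem.List.sorted_eq_of_perm_of_pairwise_lt _ _ _ ?_ ?_).symm
  · refine (List.perm_ext_iff_of_nodup (List.Nodup.filter _ (PySem.List.nodup_pyRange_one 2 (n - 1)))
      (PySem.Set.nodup_union _ _ (PySem.Set.nodup_ofList _))).mpr ?_
    intro x
    rw [List.mem_filter]
    exact pv_mem_iff n x
  · exact List.Pairwise.filter _ (PySem.List.pairwise_lt_pyRange_one 2 (n - 1))
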